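-- pv_equiv track=rewrite | github.com/kusaku/wotscripts | scripts/common/Descriptors.py | unpackIntToDict
-- ===== SOURCE A (Python) =====
-- def unpackIntToDict(descriptions, v):
--     shift = 0
--     d = {}
--     for desc in descriptions:
--         size = abs(desc[1])
--         vv = v >> shift & (1 << size) - 1
--         if desc[1] < 0 and vv >> size - 1 == 1:
--             vv = -(vv & (1 << size - 1) - 1)
--         d[desc[0]] = vv
--         shift += size
--
--     return d
-- ===== SOURCE B (Python) =====
-- def _fields(descriptions, v):
--     if not descriptions:
--         return []
--     name, spec = descriptions[0]
--     size = abs(spec)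
--     vv = v & (1 << size) - 1
--     if spec < 0 and vv >> size - 1 == 1:
--         vv = -(vv & (1 << size - 1) - 1)
--     return [(name, vv)] + _fields(descriptions[1:], v >> size)
--
--
-- def unpackIntToDict(descriptions, v):
--     return dict(_fields(descriptions, v))
-- ===== Notes on version B (the rewrite author's own statement) =====
-- stated objective: alternative
-- what changed: Replaces A's single loop with a running shift accumulator and in-place dict assignment by a recursion that masks off the low bits and shifts the remaining value itself, producing a plain (name, value) list that is turned into a dict in one final dict() call.
import Mathlib
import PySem

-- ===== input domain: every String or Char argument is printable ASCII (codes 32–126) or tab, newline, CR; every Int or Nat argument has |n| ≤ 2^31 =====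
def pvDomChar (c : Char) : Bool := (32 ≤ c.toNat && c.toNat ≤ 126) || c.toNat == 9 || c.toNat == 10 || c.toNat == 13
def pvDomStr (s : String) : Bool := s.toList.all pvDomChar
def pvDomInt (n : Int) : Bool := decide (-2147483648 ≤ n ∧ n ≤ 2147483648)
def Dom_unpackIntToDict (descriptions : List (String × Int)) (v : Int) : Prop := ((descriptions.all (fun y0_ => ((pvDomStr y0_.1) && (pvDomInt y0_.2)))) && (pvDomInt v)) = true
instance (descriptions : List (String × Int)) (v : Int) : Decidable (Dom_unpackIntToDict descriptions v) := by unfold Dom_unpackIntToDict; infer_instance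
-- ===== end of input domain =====

-- B restructures A's single running-shift loop into a recursion that consumes the value
-- (shifting v itself instead of tracking a shift offset), emits a plain (name, value) list,
-- and builds the dict once at the end; return value only, no mutation involved.

-- ===== PORT A =====
-- A's loop: state (shift, d); per field: size = abs(desc[1]); vv = v >> shift & (1<<size)-1;
-- signed fixup; d[desc[0]] = vv; shift += size.  Returned dict as its items list.
def unpackIntToDict (descriptions : List (String × Int)) (v : Int) : List (String × Int) :=
  (descriptions.foldl
    (fun (st : Nat × PySem.Dict String Int) desc =>
      let size : Nat := desc.2.natAbs
      let vv : Int := PySem.Int.band (v >>> st.1) (((1:Int) <<< size) - 1)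
      let vv : Int :=
        if desc.2 < 0 ∧ vv >>> (size - 1) = 1 then
          -(PySem.Int.band vv (((1:Int) <<< (size - 1)) - 1))
        else vv
      (st.1 + size, st.2.insert desc.1 vv))
    (0, PySem.Dict.empty)).2.items

-- ===== PORT B =====
-- _fields: recursion over the descriptions, masking the low bits off v and shifting v right.
def pvFields : List (String × Int) → Int → List (String × Int)
  | [], _ => []
  | (name, spec) :: rest, v =>
    let size : Nat := spec.natAbs
    let vv : Int := PySem.Int.band v (((1:Int) <<< size) - 1)
    let vv : Int :=
      if spec < 0 ∧ vv >>> (size - 1) = 1 then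
        -(PySem.Int.band vv (((1:Int) <<< (size - 1)) - 1))
      else vv
    (name, vv) :: pvFields rest (v >>> size)

-- dict(_fields(descriptions, v))
def unpackIntToDict_alt (descriptions : List (String × Int)) (v : Int) : List (String × Int) :=
  (PySem.Dict.ofList (pvFields descriptions v)).items

-- ===== PRECONDITION & SPEC =====
def Spec_unpackIntToDict (descriptions : List (String × Int)) (v : Int) (out : List (String × Int)) : Prop := out = unpackIntToDict_alt descriptions v
instance (descriptions : List (String × Int)) (v : Int) (out : List (String × Int)) : Decidable (Spec_unpackIntToDict descriptions v out) := by unfold Spec_unpackIntToDict; infer_instance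

-- ===== CLAIM (what is proved, stated in full; the proofs are below) =====
def Claim_equal_unpackIntToDict : Prop := ∀ (descriptions : List (String × Int)) (v : Int), Dom_unpackIntToDict descriptions v → Spec_unpackIntToDict descriptions v (unpackIntToDict descriptions v)

-- ===== LEMMAS AND PROOFS =====

lemma pv_shiftRight_add (v : Int) (a b : Nat) : v >>> a >>> b = v >>> (a + b) := by
  rw [Int.shiftRight_add]

/-- A's fold from state (s, d) equals inserting B's field list of `v >>> s` into `d`. -/
lemma pv_fold_eq_fields (descriptions : List (String × Int)) (v : Int) :
    ∀ (s : Nat) (d : PySem.Dict String Int),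
    (descriptions.foldl
      (fun (st : Nat × PySem.Dict String Int) desc =>
        let size : Nat := desc.2.natAbs
        let vv : Int := PySem.Int.band (v >>> st.1) (((1:Int) <<< size) - 1)
        let vv : Int :=
          if desc.2 < 0 ∧ vv >>> (size - 1) = 1 then
            -(PySem.Int.band vv (((1:Int) <<< (size - 1)) - 1))
          else vv
        (st.1 + size, st.2.insert desc.1 vv))
      (s, d)).2
    = (pvFields descriptions (v >>> s)).foldl (fun d p => d.insert p.1 p.2) d := by
  induction descriptions with
  | nil => intro s d; rfl
  | cons desc rest ih =>
      intro s d
      obtain ⟨name, spec⟩ := desc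
      simp only [List.foldl, pvFields]
      rw [ih (s + spec.natAbs), pv_shiftRight_add]

-- ===== VERDICT (by name: the statement is the Claim_ definition above) =====
theorem unpackIntToDict_spec : Claim_equal_unpackIntToDict := by
  intro descriptions v _
  unfold Spec_unpackIntToDict unpackIntToDict unpackIntToDict_alt
  rw [pv_fold_eq_fields descriptions v 0 PySem.Dict.empty, Int.shiftRight_zero]
  rfl
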